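-- pv_equiv track=rewrite | github.com/John-Ming-Ngo/UCalgary_School_Code | 231/Assignments/Assignment4/cpscSimulation.py | worldObjectScan
-- ===== SOURCE A (Python) =====
-- STUDENT = "S"
--
-- WORK = "w"
--
-- FUN = "f"
--
-- TAMINATOR = "T"
--
-- def worldObjectScan(world):
-- 	workPositions = []
-- 	funPositions = []
-- 	studentPosition = []
-- 	taminatorPosition = []
-- 	rowNumber = 0
-- 	for row in world:
-- 		columnNumber = 0
-- 		for column in row:
-- 			if column == WORK:
-- 				workPositions.append([rowNumber, columnNumber])
-- 			elif column == FUN: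
-- 				funPositions.append([rowNumber, columnNumber])
-- 			elif column == STUDENT:
-- 				studentPosition = [rowNumber, columnNumber]
-- 			elif column == TAMINATOR:
-- 				taminatorPosition = [rowNumber, columnNumber]
-- 			columnNumber += 1
-- 		rowNumber += 1
-- 	return workPositions, funPositions, studentPosition, taminatorPosition
-- ===== SOURCE B (Python) =====
-- STUDENT = "S"
-- WORK = "w"
-- FUN = "f"
-- TAMINATOR = "T"
--
-- def worldObjectScan(world):
--     workPositions = [[r, c] for r, row in enumerate(world) for c, v in enumerate(row) if v == WORK]
--     funPositions = [[r, c] for r, row in enumerate(world) for c, v in enumerate(row) if v == FUN]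
--     students = [[r, c] for r, row in enumerate(world) for c, v in enumerate(row) if v == STUDENT]
--     taminators = [[r, c] for r, row in enumerate(world) for c, v in enumerate(row) if v == TAMINATOR]
--     studentPosition = students[-1] if students else []
--     taminatorPosition = taminators[-1] if taminators else []
--     return workPositions, funPositions, studentPosition, taminatorPosition
-- ===== Notes on version B (the rewrite author's own statement) =====
-- stated objective: alternative
-- what changed: Replaces the single stateful nested loop (four accumulators plus manual row/column counters) with four independent enumerate-based comprehension scans, taking the last student/taminator match (or []) to reproduce last-wins defaults.
import Mathlib
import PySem

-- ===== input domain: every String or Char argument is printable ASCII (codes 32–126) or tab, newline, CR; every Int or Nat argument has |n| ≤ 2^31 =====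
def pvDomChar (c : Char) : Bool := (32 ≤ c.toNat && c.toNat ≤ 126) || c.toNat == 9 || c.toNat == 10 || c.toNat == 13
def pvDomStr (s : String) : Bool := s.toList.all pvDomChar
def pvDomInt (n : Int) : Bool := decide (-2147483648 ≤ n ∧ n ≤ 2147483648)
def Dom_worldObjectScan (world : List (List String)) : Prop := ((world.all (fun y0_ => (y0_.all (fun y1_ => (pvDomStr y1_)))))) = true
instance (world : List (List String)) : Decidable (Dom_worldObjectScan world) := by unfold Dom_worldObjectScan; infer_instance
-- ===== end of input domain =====

-- B replaces A's single stateful nested loop by four independent enumerate-based scans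
-- (objective: alternative decomposition, same asymptotic cost).

-- ===== PORT A =====
-- one grid cell: update the four accumulators, then columnNumber += 1
def wosCell (r : Int)
    (acc : (List (List Int) × List (List Int) × List Int × List Int) × Int)
    (column : String) :
    (List (List Int) × List (List Int) × List Int × List Int) × Int :=
  let st := acc.1
  let c := acc.2
  let st' :=
    if column = "w" then (st.1 ++ [[r, c]], st.2.1, st.2.2.1, st.2.2.2)
    else if column = "f" then (st.1, st.2.1 ++ [[r, c]], st.2.2.1, st.2.2.2)
    else if column = "S" then (st.1, st.2.1, [r, c], st.2.2.2)
    else if column = "T" then (st.1, st.2.1, st.2.2.1, [r, c])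
    else st
  (st', c + 1)

-- one row: columnNumber = 0; inner loop; rowNumber += 1
def wosRow
    (acc : (List (List Int) × List (List Int) × List Int × List Int) × Int)
    (row : List String) :
    (List (List Int) × List (List Int) × List Int × List Int) × Int :=
  ((row.foldl (wosCell acc.2) (acc.1, 0)).1, acc.2 + 1)

def worldObjectScan (world : List (List String)) : List (List Int) × List (List Int) × List Int × List Int :=
  (world.foldl wosRow (([], [], [], []), 0)).1

-- ===== PORT B =====
-- [[r, c] for r, row in enumerate(world) for c, v in enumerate(row) if v == target]
def wosMatches (target : String) (world : List (List String)) : List (List Int) :=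
  (PySem.List.enumerate world 0).flatMap (fun p =>
    (PySem.List.enumerate p.2 0).filterMap (fun q =>
      if q.2 = target then some [p.1, q.1] else none))

def worldObjectScan_alt (world : List (List String)) : List (List Int) × List (List Int) × List Int × List Int :=
  let workPositions := wosMatches "w" world
  let funPositions := wosMatches "f" world
  let students := wosMatches "S" world
  let taminators := wosMatches "T" world
  (workPositions, funPositions, students.getLast?.getD [], taminators.getLast?.getD [])

-- ===== PRECONDITION & SPEC =====
def Spec_worldObjectScan (world : List (List String)) (out : List (List Int) × List (List Int) × List Int × List Int) : Prop := out = worldObjectScan_alt world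
instance (world : List (List String)) (out : List (List Int) × List (List Int) × List Int × List Int) : Decidable (Spec_worldObjectScan world out) := by unfold Spec_worldObjectScan; infer_instance

-- ===== CLAIM (what is proved, stated in full; the proofs are below) =====
def Claim_equal_worldObjectScan : Prop := ∀ (world : List (List String)), Dom_worldObjectScan world → Spec_worldObjectScan world (worldObjectScan world)

-- ===== LEMMAS AND PROOFS =====

-- last-element-with-default over cons
theorem wos_lastD_cons {α : Type} (a : α) (l : List α) (d : α) :
    ((a :: l).getLast?).getD d = (l.getLast?).getD a := by
  cases l with
  | nil => simp
  | cons b t =>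
      rw [List.getLast?_cons_cons]
      cases h : (b :: t).getLast? with
      | none => simp [List.getLast?_eq_none_iff] at h
      | some x => simp

-- per-row matches starting at column c
def wosRM (target : String) (r c : Int) (row : List String) : List (List Int) :=
  (PySem.List.enumerate row c).filterMap (fun q =>
    if q.2 = target then some [r, q.1] else none)

theorem wosRM_cons (target : String) (r c : Int) (x : String) (xs : List String) :
    wosRM target r c (x :: xs) =
      (if x = target then [[r, c]] else []) ++ wosRM target r (c + 1) xs := by
  simp only [wosRM, PySem.List.enumerate_cons, List.filterMap_cons]
  split_ifs <;> simp

-- characterisation of A's inner loop from an arbitrary state and column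
theorem wos_row_fold (row : List String) (r c : Int)
    (w f : List (List Int)) (s t : List Int) :
    row.foldl (wosCell r) ((w, f, s, t), c) =
      ((w ++ wosRM "w" r c row,
        f ++ wosRM "f" r c row,
        ((wosRM "S" r c row).getLast?).getD s,
        ((wosRM "T" r c row).getLast?).getD t), c + row.length) := by
  induction row generalizing c w f s t with
  | nil => simp [wosRM, PySem.List.enumerate]
  | cons x xs ih =>
      rw [List.foldl_cons]
      by_cases hw : x = "w"
      · rw [show wosCell r ((w, f, s, t), c) x = ((w ++ [[r, c]], f, s, t), c + 1) by
            simp [wosCell, hw]]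
        rw [ih]
        simp [wosRM_cons, hw, List.append_assoc]
        omega
      · by_cases hf : x = "f"
        · rw [show wosCell r ((w, f, s, t), c) x = ((w, f ++ [[r, c]], s, t), c + 1) by
              simp [wosCell, hw, hf]]
          rw [ih]
          simp [wosRM_cons, hw, hf, List.append_assoc]
          omega
        · by_cases hs : x = "S"
          · rw [show wosCell r ((w, f, s, t), c) x = ((w, f, [r, c], t), c + 1) by
                simp [wosCell, hw, hf, hs]]
            rw [ih]
            simp [wosRM_cons, hw, hf, hs, wos_lastD_cons]
            omega
          · by_cases ht : x = "T"
            · rw [show wosCell r ((w, f, s, t), c) x = ((w, f, s, [r, c]), c + 1) by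
                  simp [wosCell, hw, hf, ht]]
              rw [ih]
              simp [wosRM_cons, hw, hf, ht, wos_lastD_cons]
              omega
            · rw [show wosCell r ((w, f, s, t), c) x = ((w, f, s, t), c + 1) by
                  simp [wosCell, hw, hf, hs, ht]]
              rw [ih]
              simp [wosRM_cons, hw, hf, hs, ht]
              omega

-- all-grid matches starting at row r
def wosM (target : String) (r : Int) (world : List (List String)) : List (List Int) :=
  (PySem.List.enumerate world r).flatMap (fun p =>
    (PySem.List.enumerate p.2 0).filterMap (fun q =>
      if q.2 = target then some [p.1, q.1] else none))

theorem wosM_cons (target : String) (r : Int) (row : List String) (ws : List (List String)) :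
    wosM target r (row :: ws) = wosRM target r 0 row ++ wosM target (r + 1) ws := by
  simp [wosM, wosRM, PySem.List.enumerate_cons]

-- characterisation of A's outer loop from an arbitrary state and row
theorem wos_world_fold (world : List (List String)) (r : Int)
    (w f : List (List Int)) (s t : List Int) :
    world.foldl wosRow ((w, f, s, t), r) =
      ((w ++ wosM "w" r world,
        f ++ wosM "f" r world,
        ((wosM "S" r world).getLast?).getD s,
        ((wosM "T" r world).getLast?).getD t), r + world.length) := by
  induction world generalizing r w f s t with
  | nil => simp [wosM, PySem.List.enumerate]
  | cons row ws ih =>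
      rw [List.foldl_cons,
        show wosRow ((w, f, s, t), r) row =
          ((w ++ wosRM "w" r 0 row, f ++ wosRM "f" r 0 row,
            ((wosRM "S" r 0 row).getLast?).getD s,
            ((wosRM "T" r 0 row).getLast?).getD t), r + 1) by
          simp [wosRow, wos_row_fold]]
      rw [ih]
      simp [wosM_cons, List.append_assoc]
      omega

-- ===== VERDICT (by name: the statement is the Claim_ definition above) =====
theorem worldObjectScan_spec : Claim_equal_worldObjectScan := by
  intro world _
  show worldObjectScan world = worldObjectScan_alt world
  rw [worldObjectScan, wos_world_fold]
  simp [worldObjectScan_alt, wosMatches, wosM]
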